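-- pv_equiv track=rewrite | github.com/timgeldard/ConnectIO-RAD | apps/spc/backend/routers/export.py | _attribute_export_rows
-- ===== SOURCE A (Python) =====
-- from typing import Optional
--
-- def _attribute_export_rows(rows: list[dict], chart_type: Optional[str]) -> list[list[object]]:
--     export_rows: list[list[object]] = []
--     for row in rows:
--         if chart_type == "p_chart":
--             export_rows.append([
--                 row.get("batch_id"),
--                 row.get("batch_date"),
--                 row.get("batch_seq"),
--                 row.get("n_inspected"),
--                 row.get("n_nonconforming"),
--                 row.get("p_value"),
--             ])
--             continue
--         if chart_type == "np_chart":
--             export_rows.append([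
--                 row.get("batch_id"),
--                 row.get("batch_date"),
--                 row.get("batch_seq"),
--                 row.get("n_inspected"),
--                 row.get("n_nonconforming"),
--             ])
--             continue
--         export_rows.append([
--             row.get("batch_id"),
--             row.get("batch_date"),
--             row.get("batch_seq"),
--             row.get("n_inspected"),
--             row.get("defect_count"),
--         ])
--     return export_rows
-- ===== SOURCE B (Python) =====
-- from typing import Optional
--
-- def _attribute_export_rows(rows: list[dict], chart_type: Optional[str]) -> list[list[object]]:
--     # Build the table column-by-column, then transpose into rows with zip.
--     tail = {"p_chart": ["n_nonconforming", "p_value"],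
--             "np_chart": ["n_nonconforming"]}.get(chart_type, ["defect_count"])
--     keys = ["batch_id", "batch_date", "batch_seq", "n_inspected"] + tail
--     columns = [[row.get(k) for row in rows] for k in keys]
--     return [list(t) for t in zip(*columns)]
-- ===== Notes on version B (the rewrite author's own statement) =====
-- stated objective: alternative
-- what changed: Builds the export table column-by-column (one column list per selected field key) and then transposes the columns back into rows with zip, instead of A's per-row chart-type branching over three inline literal row lists.
import Mathlib
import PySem

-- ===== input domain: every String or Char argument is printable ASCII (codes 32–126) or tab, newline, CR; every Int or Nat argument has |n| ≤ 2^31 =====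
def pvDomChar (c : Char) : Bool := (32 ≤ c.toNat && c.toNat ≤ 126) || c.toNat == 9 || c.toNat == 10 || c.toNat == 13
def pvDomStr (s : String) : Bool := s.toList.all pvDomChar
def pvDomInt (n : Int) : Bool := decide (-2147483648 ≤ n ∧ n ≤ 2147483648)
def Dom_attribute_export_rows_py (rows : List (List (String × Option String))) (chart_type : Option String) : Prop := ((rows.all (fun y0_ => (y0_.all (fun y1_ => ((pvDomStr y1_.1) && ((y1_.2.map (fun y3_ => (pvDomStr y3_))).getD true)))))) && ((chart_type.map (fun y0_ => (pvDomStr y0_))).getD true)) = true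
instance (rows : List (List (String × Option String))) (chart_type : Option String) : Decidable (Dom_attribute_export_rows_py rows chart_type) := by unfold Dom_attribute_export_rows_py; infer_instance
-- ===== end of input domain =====

-- B builds the export table column-by-column (one column list per selected field key) and
-- transposes the columns back into rows with a zip, instead of A's per-row chart-type
-- branching over three inline literal row lists (objective: alternative).

-- row.get(k): first-match lookup in the association list, missing key -> None
def pvRowGet (row : List (String × Option String)) (k : String) : Option String :=
  (((row.find? (fun p => p.1 == k)).map Prod.snd).getD none)

-- ===== PORT A =====
def attribute_export_rows_py (rows : List (List (String × Option String))) (chart_type : Option String) : List (List (Option String)) :=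
  rows.foldl (fun export_rows row =>
    if chart_type = some "p_chart" then
      export_rows ++ [[pvRowGet row "batch_id", pvRowGet row "batch_date", pvRowGet row "batch_seq",
                       pvRowGet row "n_inspected", pvRowGet row "n_nonconforming", pvRowGet row "p_value"]]
    else if chart_type = some "np_chart" then
      export_rows ++ [[pvRowGet row "batch_id", pvRowGet row "batch_date", pvRowGet row "batch_seq",
                       pvRowGet row "n_inspected", pvRowGet row "n_nonconforming"]]
    else
      export_rows ++ [[pvRowGet row "batch_id", pvRowGet row "batch_date", pvRowGet row "batch_seq",
                       pvRowGet row "n_inspected", pvRowGet row "defect_count"]]) []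

-- ===== PORT B =====
-- Python's zip(*columns): emit one output row of the column heads while every column is
-- nonempty, stopping at the shortest column.  pvZipAux recurses on the first column's spine.
def pvZipAux {α : Type} : List α → List (List α) → List (List α)
  | [], _ => []
  | a :: as, rest =>
      if rest.all (fun c => !c.isEmpty) then
        (a :: rest.filterMap List.head?) :: pvZipAux as (rest.map List.tail)
      else []

def pvZipCols {α : Type} : List (List α) → List (List α)
  | [] => []
  | c :: rest => pvZipAux c rest

def pvTailTable : PySem.Dict (Option String) (List String) :=
  PySem.Dict.ofList
    [(some "p_chart", ["n_nonconforming", "p_value"]),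
     (some "np_chart", ["n_nonconforming"])]

def attribute_export_rows_py_alt (rows : List (List (String × Option String))) (chart_type : Option String) : List (List (Option String)) :=
  let tail := PySem.Dict.getD pvTailTable chart_type ["defect_count"]
  let keys := ["batch_id", "batch_date", "batch_seq", "n_inspected"] ++ tail
  let columns := keys.map (fun k => rows.map (fun row => pvRowGet row k))
  pvZipCols columns

-- ===== PRECONDITION & SPEC =====
def Spec_attribute_export_rows_py (rows : List (List (String × Option String))) (chart_type : Option String) (out : List (List (Option String))) : Prop := out = attribute_export_rows_py_alt rows chart_type
instance (rows : List (List (String × Option String))) (chart_type : Option String) (out : List (List (Option String))) : Decidable (Spec_attribute_export_rows_py rows chart_type out) := by unfold Spec_attribute_export_rows_py; infer_instance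

-- ===== CLAIM (what is proved, stated in full; the proofs are below) =====
def Claim_equal_attribute_export_rows_py : Prop := ∀ (rows : List (List (String × Option String))) (chart_type : Option String), Dom_attribute_export_rows_py rows chart_type → Spec_attribute_export_rows_py rows chart_type (attribute_export_rows_py rows chart_type)

-- ===== LEMMAS AND PROOFS =====
theorem pv_foldl_append_map {α β : Type} (f : α → β) (rows : List α) (acc : List β) :
    rows.foldl (fun a r => a ++ [f r]) acc = acc ++ rows.map f := by
  induction rows generalizing acc with
  | nil => simp
  | cons r rs ih => simp [List.foldl, ih]

-- zipping the columns generated pointwise from the rows reproduces the rows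
theorem pv_zipAux_cols {α β κ : Type} (f : α → β) (g : κ → α → β)
    (rows : List α) (ks : List κ) :
    pvZipAux (rows.map f) (ks.map (fun k => rows.map (g k))) =
      rows.map (fun r => f r :: ks.map (fun k => g k r)) := by
  induction rows with
  | nil => simp [pvZipAux]
  | cons r rs ih =>
    simp only [List.map_cons]
    simp only [pvZipAux]
    have hall : (ks.map (fun k => g k r :: rs.map (g k))).all (fun c => !c.isEmpty) = true := by
      simp [List.all_eq_true]
    rw [if_pos hall]
    have hheads : (ks.map (fun k => g k r :: rs.map (g k))).filterMap List.head? =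
        ks.map (fun k => g k r) := by
      induction ks with
      | nil => simp
      | cons k ks' ihk => simp
    have htails : (ks.map (fun k => g k r :: rs.map (g k))).map List.tail =
        ks.map (fun k => rs.map (g k)) := by
      simp [List.map_map, Function.comp]
    rw [hheads, htails, ih]

theorem pv_zip_cols {α β κ : Type} (g : κ → α → β) (rows : List α) (k : κ) (ks : List κ) :
    pvZipCols ((k :: ks).map (fun k' => rows.map (g k'))) =
      rows.map (fun r => (k :: ks).map (fun k' => g k' r)) := by
  simp only [List.map_cons, pvZipCols]
  rw [pv_zipAux_cols]

theorem pv_tail_p :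
    PySem.Dict.getD pvTailTable (some "p_chart") ["defect_count"] =
      ["n_nonconforming", "p_value"] := by decide

theorem pv_tail_np :
    PySem.Dict.getD pvTailTable (some "np_chart") ["defect_count"] =
      ["n_nonconforming"] := by decide

theorem pv_tail_other (ct : Option String) (h1 : ct ≠ some "p_chart") (h2 : ct ≠ some "np_chart") :
    PySem.Dict.getD pvTailTable ct ["defect_count"] = ["defect_count"] := by
  have hitems : pvTailTable.items =
      [(some "p_chart", ["n_nonconforming", "p_value"]),
       (some "np_chart", ["n_nonconforming"])] := by decide
  have e1 : ((some "p_chart" : Option String) == ct) = false := by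
    simp only [beq_eq_false_iff_ne]; exact fun h => h1 h.symm
  have e2 : ((some "np_chart" : Option String) == ct) = false := by
    simp only [beq_eq_false_iff_ne]; exact fun h => h2 h.symm
  simp [PySem.Dict.getD, PySem.Dict.get?, hitems, List.find?, e1, e2]

-- ===== VERDICT (by name: the statement is the Claim_ definition above) =====
theorem attribute_export_rows_py_spec : Claim_equal_attribute_export_rows_py := by
  intro rows chart_type _
  unfold Spec_attribute_export_rows_py attribute_export_rows_py attribute_export_rows_py_alt
  by_cases h1 : chart_type = some "p_chart"
  · subst h1
    simp only [reduceIte, pv_tail_p]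
    simp only [List.cons_append, List.nil_append]
    rw [pv_foldl_append_map, pv_zip_cols (fun k row => pvRowGet row k) rows]
    simp [List.map]
  · by_cases h2 : chart_type = some "np_chart"
    · subst h2
      simp only [if_neg h1, if_true, pv_tail_np]
      simp only [List.cons_append, List.nil_append]
      rw [pv_foldl_append_map, pv_zip_cols (fun k row => pvRowGet row k) rows]
      simp [List.map]
    · simp only [if_neg h1, if_neg h2, pv_tail_other chart_type h1 h2]
      simp only [List.cons_append, List.nil_append]
      rw [pv_foldl_append_map, pv_zip_cols (fun k row => pvRowGet row k) rows]
      simp [List.map]
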